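-- pv_equiv track=rewrite | github.com/ydb-platform/ydb | contrib/python/graphiti-core/graphiti_core/utils/maintenance/dedup_helpers.py | _lsh_bands
-- ===== SOURCE A (Python) =====
-- from collections.abc import Iterable
--
-- _MINHASH_BAND_SIZE = 4
--
-- def _lsh_bands(signature: Iterable[int]) -> list[tuple[int, ...]]:
--     """Split the MinHash signature into fixed-size bands for locality-sensitive hashing."""
--     signature_list = list(signature)
--     if not signature_list:
--         return []
--
--     bands: list[tuple[int, ...]] = []
--     for start in range(0, len(signature_list), _MINHASH_BAND_SIZE):
--         band = tuple(signature_list[start : start + _MINHASH_BAND_SIZE])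
--         if len(band) == _MINHASH_BAND_SIZE:
--             bands.append(band)
--     return bands
-- ===== SOURCE B (Python) =====
-- _MINHASH_BAND_SIZE = 4
--
-- def _lsh_bands(signature):
--     """Grouper idiom: one shared iterator consumed 4-at-a-time by zip;
--     zip drops the incomplete trailing group itself."""
--     return list(zip(*[iter(list(signature))] * _MINHASH_BAND_SIZE))
-- ===== Notes on version B (the rewrite author's own statement) =====
-- stated objective: idiomatic
-- what changed: Replaced the index-range loop with per-band slicing and an explicit len(band)==4 guard by the classic grouper idiom list(zip(*[iter(list(signature))]*4)): one shared iterator is consumed four elements at a time by zip, which drops the incomplete trailing group itself.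
import Mathlib
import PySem

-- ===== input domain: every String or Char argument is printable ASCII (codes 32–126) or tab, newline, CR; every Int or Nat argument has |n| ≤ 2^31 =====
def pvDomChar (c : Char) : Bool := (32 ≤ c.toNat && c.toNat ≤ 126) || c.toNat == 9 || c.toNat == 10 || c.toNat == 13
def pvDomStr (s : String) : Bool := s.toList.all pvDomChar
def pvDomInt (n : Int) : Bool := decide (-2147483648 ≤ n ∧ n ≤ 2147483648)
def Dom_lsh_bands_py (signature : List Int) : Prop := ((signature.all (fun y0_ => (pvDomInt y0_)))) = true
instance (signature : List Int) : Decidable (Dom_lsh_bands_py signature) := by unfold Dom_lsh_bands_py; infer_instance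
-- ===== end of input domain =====

-- B replaces the index/slice loop by the grouper idiom (one shared iterator consumed 4-at-a-time by zip); same values, idiomatic decomposition.

-- ===== PORT A =====
def lsh_bands_py (signature : List Int) : List (List Int) :=
  let signature_list := signature
  if signature_list.isEmpty then []
  else
    (PySem.List.pyRange 0 (signature_list.length : Int) 4).foldl
      (fun bands start =>
        let band := PySem.List.slice signature_list (some start) (some (start + 4))
        if band.length == 4 then bands ++ [band] else bands)
      []

-- ===== PORT B =====
-- zip over one shared iterator of the materialised list: each zip step consumes
-- four elements; when fewer than four remain, zip stops (trailing group dropped).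
def lsh_bands_py_alt : List Int → List (List Int)
  | a :: b :: c :: d :: rest => [a, b, c, d] :: lsh_bands_py_alt rest
  | _ => []

-- ===== PRECONDITION & SPEC =====
def Spec_lsh_bands_py (signature : List Int) (out : List (List Int)) : Prop := out = lsh_bands_py_alt signature
instance (signature : List Int) (out : List (List Int)) : Decidable (Spec_lsh_bands_py signature out) := by unfold Spec_lsh_bands_py; infer_instance

-- ===== CLAIM (what is proved, stated in full; the proofs are below) =====
def Claim_equal_lsh_bands_py : Prop := ∀ (signature : List Int), Dom_lsh_bands_py signature → Spec_lsh_bands_py signature (lsh_bands_py signature)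

-- ===== LEMMAS AND PROOFS =====

-- the body of A's loop, named for the proofs
def pvStep (xs : List Int) (bands : List (List Int)) (start : Int) : List (List Int) :=
  let band := PySem.List.slice xs (some start) (some (start + 4))
  if band.length == 4 then bands ++ [band] else bands

-- the loop over the whole signature equals B's 4-at-a-time recursion, any accumulator
theorem pvStep_shift (a b c d : Int) (rest : List Int) (acc : List (List Int)) (s : Int) (hs : 0 ≤ s) :
    pvStep (a :: b :: c :: d :: rest) acc (s + 4) = pvStep rest acc s := by
  unfold pvStep
  rw [PySem.List.slice_toNat _ (by omega) (by omega), PySem.List.slice_toNat _ hs (by omega)]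
  have h4 : (s + 4).toNat = s.toNat + 4 := by omega
  have h8 : (s + 4 + 4).toNat = s.toNat + 8 := by omega
  have hd : List.drop (s.toNat + 4) (a :: b :: c :: d :: rest) = List.drop s.toNat rest := rfl
  have e1 : s.toNat + 8 - (s.toNat + 4) = 4 := by omega
  have e2 : s.toNat + 4 - s.toNat = 4 := by omega
  rw [h4, h8, hd, e1, e2]

theorem pvRange_split (n : Nat) :
    PySem.List.pyRange 0 ((n : Int) + 4) 4 = 0 :: (PySem.List.pyRange 0 (n : Int) 4).map (· + 4) := by
  rw [PySem.List.pyRange_of_pos _ _ (by norm_num), PySem.List.pyRange_of_pos _ _ (by norm_num)]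
  have hc1 : (if (0:Int) < (n : Int) + 4 then (((n : Int) + 4 - 0 + 4 - 1) / 4).toNat else 0) = (n + 3) / 4 + 1 := by
    rw [if_pos (by omega)]
    omega
  have hc2 : (if (0:Int) < (n : Int) then (((n : Int) - 0 + 4 - 1) / 4).toNat else 0) = (n + 3) / 4 := by
    split <;> omega
  rw [hc1, hc2, List.range_succ_eq_map, List.map_cons, List.map_map, List.map_map]
  congr 1

theorem pv_loop_eq (xs : List Int) :
    ∀ acc, (PySem.List.pyRange 0 (xs.length : Int) 4).foldl (pvStep xs) acc
      = acc ++ lsh_bands_py_alt xs := by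
  induction xs using lsh_bands_py_alt.induct with
  | case1 a b c d rest ih =>
    intro acc
    have hlen : ((a :: b :: c :: d :: rest).length : Int) = (rest.length : Int) + 4 := by
      simp; ring
    rw [hlen, pvRange_split, List.foldl_cons, List.foldl_map]
    have h0 : pvStep (a :: b :: c :: d :: rest) acc 0 = acc ++ [[a, b, c, d]] := by
      unfold pvStep
      rw [PySem.List.slice_toNat _ (by omega) (by omega)]
      rfl
    rw [h0]
    rw [PySem.List.foldl_congr_mem _ _ (pvStep rest) _ (by
      intro acc' s hsmem
      have hs : 0 ≤ s := ((PySem.List.mem_pyRange_iff_of_pos (by norm_num) s).mp hsmem).1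
      exact pvStep_shift a b c d rest acc' s hs)]
    rw [ih]
    simp [lsh_bands_py_alt]
  | case2 t h =>
    intro acc
    rcases t with _ | ⟨a, _ | ⟨b, _ | ⟨c, _ | ⟨d, r⟩⟩⟩⟩
    · simp only [List.length_nil, Nat.cast_zero, show PySem.List.pyRange 0 0 4 = [] from rfl,
        List.foldl_nil, lsh_bands_py_alt, List.append_nil]
    · rw [show ((([a] : List Int).length : Int)) = 1 by simp,
          show PySem.List.pyRange 0 1 4 = [0] from rfl]
      simp only [List.foldl_cons, List.foldl_nil]
      unfold pvStep
      rw [PySem.List.slice_toNat _ (by omega) (by omega)]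
      norm_num [lsh_bands_py_alt]
    · rw [show ((([a, b] : List Int).length : Int)) = 2 by simp,
          show PySem.List.pyRange 0 2 4 = [0] from rfl]
      simp only [List.foldl_cons, List.foldl_nil]
      unfold pvStep
      rw [PySem.List.slice_toNat _ (by omega) (by omega)]
      norm_num [lsh_bands_py_alt]
    · rw [show ((([a, b, c] : List Int).length : Int)) = 3 by simp,
          show PySem.List.pyRange 0 3 4 = [0] from rfl]
      simp only [List.foldl_cons, List.foldl_nil]
      unfold pvStep
      rw [PySem.List.slice_toNat _ (by omega) (by omega)]
      norm_num [lsh_bands_py_alt]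
    · exact absurd rfl (h a b c d r)

-- ===== VERDICT (by name: the statement is the Claim_ definition above) =====
theorem lsh_bands_py_spec : Claim_equal_lsh_bands_py := by
  intro xs _
  show lsh_bands_py xs = lsh_bands_py_alt xs
  unfold lsh_bands_py
  by_cases h : xs.isEmpty
  · simp [h]
    cases xs with
    | nil => rfl
    | cons a t => simp at h
  · simp only [h, Bool.false_eq_true, if_false]
    exact pv_loop_eq xs []
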